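-- pv_equiv track=rewrite | github.com/akashmathew18/MINI-PROJECT-III | script_analysis/script_analyzer.py | _analyze_scene_tone
-- ===== SOURCE A (Python) =====
-- def _analyze_scene_tone(scene: str) -> str:
--     """Analyze the emotional tone of a scene."""
--     scene_lower = scene.lower()
--
--     if any(word in scene_lower for word in ['happy', 'joy', 'laugh', 'smile', 'celebrate']):
--         return 'positive'
--     elif any(word in scene_lower for word in ['sad', 'cry', 'depressed', 'lonely', 'grief']):
--         return 'sad'
--     elif any(word in scene_lower for word in ['angry', 'rage', 'furious', 'mad', 'hostile']):
--         return 'angry'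
--     elif any(word in scene_lower for word in ['scared', 'afraid', 'terrified', 'fear', 'panic']):
--         return 'tense'
--     elif any(word in scene_lower for word in ['romantic', 'love', 'kiss', 'passion', 'intimate']):
--         return 'romantic'
--
--     return 'neutral'
-- ===== SOURCE B (Python) =====
-- _KEYWORD_PRIORITY = [
--     ('happy', 0), ('joy', 0), ('laugh', 0), ('smile', 0), ('celebrate', 0),
--     ('sad', 1), ('cry', 1), ('depressed', 1), ('lonely', 1), ('grief', 1),
--     ('angry', 2), ('rage', 2), ('furious', 2), ('mad', 2), ('hostile', 2),
--     ('scared', 3), ('afraid', 3), ('terrified', 3), ('fear', 3), ('panic', 3),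
--     ('romantic', 4), ('love', 4), ('kiss', 4), ('passion', 4), ('intimate', 4),
-- ]
-- _TONES = ['positive', 'sad', 'angry', 'tense', 'romantic', 'neutral']
--
-- def _analyze_scene_tone(scene: str) -> str:
--     scene_lower = scene.lower()
--     best = 5
--     for word, pri in _KEYWORD_PRIORITY:
--         if pri < best and word in scene_lower:
--             best = pri
--     return _TONES[best]
-- ===== Notes on version B (the rewrite author's own statement) =====
-- stated objective: alternative
-- what changed: Replaces the five-branch early-return chain of group membership tests by a single flat pass over 25 (keyword, priority) pairs maintaining a minimum-matched-priority accumulator, then one index into a tone table.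
import Mathlib
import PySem

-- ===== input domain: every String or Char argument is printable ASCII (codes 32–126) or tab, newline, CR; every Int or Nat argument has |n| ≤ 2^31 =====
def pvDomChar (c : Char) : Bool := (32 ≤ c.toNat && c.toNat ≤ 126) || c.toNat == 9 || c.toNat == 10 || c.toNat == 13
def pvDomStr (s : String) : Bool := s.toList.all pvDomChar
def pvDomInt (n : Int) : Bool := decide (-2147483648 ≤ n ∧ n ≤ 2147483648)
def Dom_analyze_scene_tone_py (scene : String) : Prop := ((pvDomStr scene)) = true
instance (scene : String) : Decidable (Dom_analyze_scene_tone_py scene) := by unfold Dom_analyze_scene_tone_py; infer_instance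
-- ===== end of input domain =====

-- B replaces A's five-branch early-return keyword chain by one flat pass over (keyword, priority)
-- pairs that keeps the minimum matched priority, then indexes a tone table (alternative decomposition).

-- ===== PORT A =====
def analyze_scene_tone_py (scene : String) : String :=
  let scene_lower := PySem.Str.lower scene
  if (["happy", "joy", "laugh", "smile", "celebrate"].any fun word => PySem.Str.isIn word scene_lower) then
    "positive"
  else if (["sad", "cry", "depressed", "lonely", "grief"].any fun word => PySem.Str.isIn word scene_lower) then
    "sad"
  else if (["angry", "rage", "furious", "mad", "hostile"].any fun word => PySem.Str.isIn word scene_lower) then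
    "angry"
  else if (["scared", "afraid", "terrified", "fear", "panic"].any fun word => PySem.Str.isIn word scene_lower) then
    "tense"
  else if (["romantic", "love", "kiss", "passion", "intimate"].any fun word => PySem.Str.isIn word scene_lower) then
    "romantic"
  else
    "neutral"

-- ===== PORT B =====
def keywordPriority : List (String × Nat) :=
  [("happy", 0), ("joy", 0), ("laugh", 0), ("smile", 0), ("celebrate", 0),
   ("sad", 1), ("cry", 1), ("depressed", 1), ("lonely", 1), ("grief", 1),
   ("angry", 2), ("rage", 2), ("furious", 2), ("mad", 2), ("hostile", 2),
   ("scared", 3), ("afraid", 3), ("terrified", 3), ("fear", 3), ("panic", 3),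
   ("romantic", 4), ("love", 4), ("kiss", 4), ("passion", 4), ("intimate", 4)]

def tonesTable : List String := ["positive", "sad", "angry", "tense", "romantic", "neutral"]

def analyze_scene_tone_py_alt (scene : String) : String :=
  let scene_lower := PySem.Str.lower scene
  let best := keywordPriority.foldl
    (fun best p => if p.2 < best ∧ PySem.Str.isIn p.1 scene_lower = true then p.2 else best) 5
  -- best ≤ 5 always holds, so _TONES[best] never raises; plain getD is exact here
  tonesTable.getD best "neutral"

-- ===== PRECONDITION & SPEC =====
def Spec_analyze_scene_tone_py (scene : String) (out : String) : Prop := out = analyze_scene_tone_py_alt scene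
instance (scene : String) (out : String) : Decidable (Spec_analyze_scene_tone_py scene out) := by unfold Spec_analyze_scene_tone_py; infer_instance

-- ===== CLAIM (what is proved, stated in full; the proofs are below) =====
def Claim_equal_analyze_scene_tone_py : Prop := ∀ (scene : String), Dom_analyze_scene_tone_py scene → Spec_analyze_scene_tone_py scene (analyze_scene_tone_py scene)

-- ===== LEMMAS AND PROOFS =====

-- A constant-priority segment of the flat pass behaves like a single group test.
theorem foldl_const_priority (c : String → Bool) (k : Nat) (g : List String) (b : Nat) :
    ((g.map (fun w => (w, k))).foldl
      (fun best p => if p.2 < best ∧ c p.1 = true then p.2 else best) b)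
    = if k < b ∧ g.any c = true then k else b := by
  induction g generalizing b with
  | nil => simp
  | cons w g ih =>
    simp only [List.map_cons, List.foldl_cons, List.any_cons, ih]
    by_cases hw : c w = true <;> by_cases hb : k < b <;>
      simp [hw, hb]

-- ===== VERDICT (by name: the statement is the Claim_ definition above) =====
theorem analyze_scene_tone_py_spec : Claim_equal_analyze_scene_tone_py := by
  intro scene _
  unfold Spec_analyze_scene_tone_py analyze_scene_tone_py analyze_scene_tone_py_alt
  set sl := PySem.Str.lower scene with hsl
  have hflat : keywordPriority =
      (["happy", "joy", "laugh", "smile", "celebrate"].map (fun w => (w, 0))) ++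
      (["sad", "cry", "depressed", "lonely", "grief"].map (fun w => (w, 1))) ++
      (["angry", "rage", "furious", "mad", "hostile"].map (fun w => (w, 2))) ++
      (["scared", "afraid", "terrified", "fear", "panic"].map (fun w => (w, 3))) ++
      (["romantic", "love", "kiss", "passion", "intimate"].map (fun w => (w, 4))) := by rfl
  rw [hflat]
  simp only [List.foldl_append, foldl_const_priority (fun w => PySem.Str.isIn w sl)]
  generalize (["happy", "joy", "laugh", "smile", "celebrate"].any fun w => PySem.Str.isIn w sl) = a0
  generalize (["sad", "cry", "depressed", "lonely", "grief"].any fun w => PySem.Str.isIn w sl) = a1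
  generalize (["angry", "rage", "furious", "mad", "hostile"].any fun w => PySem.Str.isIn w sl) = a2
  generalize (["scared", "afraid", "terrified", "fear", "panic"].any fun w => PySem.Str.isIn w sl) = a3
  generalize (["romantic", "love", "kiss", "passion", "intimate"].any fun w => PySem.Str.isIn w sl) = a4
  revert a0 a1 a2 a3 a4
  decide
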